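-- pv_equiv track=rewrite | github.com/thongdanghoang/adventtocode2025 | day04/solutions.py | part2
-- ===== SOURCE A (Python) =====
-- def fewer_than_four_rolls_of_paper(row_index: int, col_index: int, input: list[list[str]]) -> bool:
--     row_lenth = len(input)
--     col_lenth = len(input[0])
--
--     rolls_of_paper: int = -1
--     for row in range(max(0, row_index - 1), min(row_index + 2, row_lenth)):
--         for col in range(max(0, col_index - 1), min(col_index + 2, col_lenth)):
--             cell = input[row][col]
--             if cell == "@":
--                 rolls_of_paper += 1
--     return rolls_of_paper < 4
--
-- def part2(data):
--     total: int = 0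
--     while True:
--         cur_total, data = ride_until_no_more_changes(data)
--         total += cur_total
--         if cur_total == 0:
--             break
--     return total
--
-- def ride_until_no_more_changes(data: list[list[str]]) -> tuple[int, list[list[str]]]:
--     total: int = 0
--     to_be_replaced: list[tuple[int, int]] = []
--     for rowIndex, row in enumerate(data):
--         for colIndex, cell in enumerate(row):
--             if cell == "@" and fewer_than_four_rolls_of_paper(rowIndex, colIndex, data):
--                 total += 1
--                 to_be_replaced.append((rowIndex, colIndex))
--     for rowIndex, row in enumerate(data):
--         for colIndex, cell in enumerate(row):
--             if (rowIndex, colIndex) in to_be_replaced: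
--                 data[rowIndex][colIndex] = "x"
--     return total, data
-- ===== SOURCE B (Python) =====
-- def part2(data):
--     alive = set()
--     for r, row in enumerate(data):
--         for c, cell in enumerate(row):
--             if cell == "@":
--                 alive.add((r, c))
--     removed = 0
--     while True:
--         doomed = [p for p in alive
--                   if sum(((p[0] + dr, p[1] + dc) in alive) for dr in (-1, 0, 1) for dc in (-1, 0, 1)) - 1 < 4]
--         if not doomed:
--             return removed
--         removed += len(doomed)
--         alive.difference_update(doomed)
-- ===== Notes on version B (the rewrite author's own statement) =====
-- stated objective: alternative
-- what changed: B erodes a set of '@' coordinates round by round (set membership over fixed 3x3 offsets, set difference) instead of A's grid-of-strings rounds that rescan a to_be_replaced list for every cell and rebuild the grid with 'x' markers.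
-- outside the precondition, e.g. on part2([['@', '@'], ['@']]): A raises IndexError, B returns 3
import Mathlib
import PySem

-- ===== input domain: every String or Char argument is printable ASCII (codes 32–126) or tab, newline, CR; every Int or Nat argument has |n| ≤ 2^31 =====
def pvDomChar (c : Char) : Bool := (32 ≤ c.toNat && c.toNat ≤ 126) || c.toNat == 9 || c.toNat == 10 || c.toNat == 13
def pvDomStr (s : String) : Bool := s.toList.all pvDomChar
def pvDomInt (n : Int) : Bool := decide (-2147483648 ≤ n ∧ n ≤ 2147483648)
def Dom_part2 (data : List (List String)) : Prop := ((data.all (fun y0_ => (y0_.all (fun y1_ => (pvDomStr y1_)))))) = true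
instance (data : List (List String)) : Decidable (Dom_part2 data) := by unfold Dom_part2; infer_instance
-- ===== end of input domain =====

-- B re-implements the round-based grid erosion on a set of '@' coordinates (membership tests on a
-- coordinate set, fixed 3x3 offsets) instead of rewriting the grid of strings and rescanning a
-- removal list each round (objective: alternative). Python A mutates `data` in place; the
-- equivalence proved here is about the RETURN value only (B does not mutate its argument).

-- ===== PORT A =====
def fewerThanFour (row_index col_index : Int) (input : List (List String)) : Bool :=
  let row_lenth : Int := (input.length : Int)
  let col_lenth : Int := (((PySem.List.pyGet? input 0).getD []).length : Int)
  let rolls : Int :=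
    (PySem.List.pyRange (max 0 (row_index - 1)) (min (row_index + 2) row_lenth) 1).foldl
      (fun acc row =>
        (PySem.List.pyRange (max 0 (col_index - 1)) (min (col_index + 2) col_lenth) 1).foldl
          (fun acc col =>
            -- input[row][col]: in range whenever Pre_part2 holds (rectangular grid), so the
            -- `.getD` defaults are unreachable on admitted inputs
            let cell := (PySem.List.pyGet? ((PySem.List.pyGet? input row).getD []) col).getD ""
            if cell == "@" then acc + 1 else acc)
          acc)
      (-1)
  decide (rolls < 4)

def rideUntilNoMoreChanges (data : List (List String)) : Int × List (List String) :=
  let acc :=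
    (PySem.List.enumerate data 0).foldl
      (fun (acc : Int × List (Int × Int)) p =>
        (PySem.List.enumerate p.2 0).foldl
          (fun (acc : Int × List (Int × Int)) q =>
            if q.2 == "@" && fewerThanFour p.1 q.1 data then (acc.1 + 1, acc.2 ++ [(p.1, q.1)])
            else acc)
          acc)
      (0, [])
  -- Python's second loop mutates `data` cell by cell; rebuilt functionally (return value)
  let data' :=
    (PySem.List.enumerate data 0).map (fun p =>
      (PySem.List.enumerate p.2 0).map (fun q =>
        if (p.1, q.1) ∈ acc.2 then "x" else q.2))
  (acc.1, data')

-- fuel for A's `while True`: one round per removed '@' cell plus the final zero round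
def atCount (data : List (List String)) : Nat :=
  (data.map (fun row => row.count "@")).sum

def part2Go : Nat → Int → List (List String) → Int
  | 0, total, _ => total
  | fuel + 1, total, data =>
    let r := rideUntilNoMoreChanges data
    if r.1 == 0 then total + r.1 else part2Go fuel (total + r.1) r.2

def part2 (data : List (List String)) : Int := part2Go (atCount data + 1) 0 data

-- ===== PORT B =====
def aliveInit (data : List (List String)) : PySem.Set (Int × Int) :=
  (PySem.List.enumerate data 0).foldl
    (fun s p =>
      (PySem.List.enumerate p.2 0).foldl
        (fun s q => if q.2 == "@" then PySem.Set.add s (p.1, q.1) else s) s)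
    PySem.Set.empty

def neighborSum (alive : PySem.Set (Int × Int)) (p : Int × Int) : Int :=
  ([-1, 0, 1] : List Int).foldl
    (fun acc dr =>
      ([-1, 0, 1] : List Int).foldl
        (fun acc dc => acc + (if PySem.Set.contains alive (p.1 + dr, p.2 + dc) then 1 else 0))
        acc)
    0

-- fuel for B's `while True`: one round per removed coordinate plus the final empty round
def part2AltGo : Nat → Int → PySem.Set (Int × Int) → Int
  | 0, removed, _ => removed
  | fuel + 1, removed, alive =>
    let doomed := alive.filter (fun p => decide (neighborSum alive p - 1 < 4))
    if doomed.isEmpty then removed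
    else part2AltGo fuel (removed + (doomed.length : Int)) (PySem.Set.diff alive doomed)

def part2_alt (data : List (List String)) : Int :=
  part2AltGo ((aliveInit data).length + 1) 0 (aliveInit data)

-- ===== PRECONDITION & SPEC =====
-- Pre_ restricts to the task's natural domain, rectangular grids (or grids without any "@",
-- where no cell is ever inspected): on ragged grids containing "@", A either raises IndexError
-- or clips every row's neighbourhood by the FIRST row's length, an accident of its implementation.
def Pre_part2 (data : List (List String)) : Prop :=
  (∀ row ∈ data, row.length = (data.headD []).length) ∨ (∀ row ∈ data, "@" ∉ row)

instance (data : List (List String)) : Decidable (Pre_part2 data) := by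
  unfold Pre_part2; infer_instance

def pvWitness_part2 : List (List String) := [["@", "."], [".", "@"]]

def Spec_part2 (data : List (List String)) (out : Int) : Prop := out = part2_alt data
instance (data : List (List String)) (out : Int) : Decidable (Spec_part2 data out) := by
  unfold Spec_part2; infer_instance

-- ===== CLAIM (what is proved, stated in full; the proofs are below) =====
def Claim_equal_part2 : Prop :=
  ∀ (data : List (List String)), Dom_part2 data → Pre_part2 data → Spec_part2 data (part2 data)

-- ===== LEMMAS AND PROOFS =====
def cellAt (g : List (List String)) (r c : Int) : String :=
  (PySem.List.pyGet? ((PySem.List.pyGet? g r).getD []) c).getD ""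

def Rect (g : List (List String)) : Prop := ∀ row ∈ g, row.length = (g.headD []).length

def atList (g : List (List String)) : List (Int × Int) :=
  (PySem.List.enumerate g 0).flatMap (fun p =>
    ((PySem.List.enumerate p.2 0).filter (fun q => q.2 == "@")).map (fun q => (p.1, q.1)))

def selList (g : List (List String)) : List (Int × Int) :=
  (PySem.List.enumerate g 0).flatMap (fun p =>
    ((PySem.List.enumerate p.2 0).filter
        (fun q => q.2 == "@" && fewerThanFour p.1 q.1 g)).map (fun q => (p.1, q.1)))

def markGrid (g : List (List String)) (tbr : List (Int × Int)) : List (List String) :=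
  (PySem.List.enumerate g 0).map (fun p =>
    (PySem.List.enumerate p.2 0).map (fun q => if (p.1, q.1) ∈ tbr then "x" else q.2))

-- inner accumulation loop of `rideUntilNoMoreChanges`
lemma foldl_pair_count (xs : List (Int × String)) (P : Int × String → Bool)
    (F : Int × String → Int × Int) (t : Int) (l : List (Int × Int)) :
    xs.foldl (fun acc q => if P q then (acc.1 + 1, acc.2 ++ [F q]) else acc) (t, l)
      = (t + ((xs.filter P).length : Int), l ++ (xs.filter P).map F) := by
  induction xs generalizing t l with
  | nil => simp
  | cons x xs ih =>
    simp only [List.foldl_cons, List.filter_cons]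
    by_cases h : P x
    · rw [if_pos h, if_pos h, ih]
      refine Prod.ext ?_ ?_
      · show _ = t + (_ : Int); push_cast [List.length_cons]; ring
      · simp
    · rw [if_neg h, if_neg h, ih]

lemma ride_fold (g : List (List String)) (rows : List (Int × List String)) (t : Int)
    (l : List (Int × Int)) :
    rows.foldl
      (fun (acc : Int × List (Int × Int)) p =>
        (PySem.List.enumerate p.2 0).foldl
          (fun (acc : Int × List (Int × Int)) q =>
            if q.2 == "@" && fewerThanFour p.1 q.1 g then (acc.1 + 1, acc.2 ++ [(p.1, q.1)])
            else acc)
          acc)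
      (t, l)
      = (t + ((rows.flatMap (fun p =>
            ((PySem.List.enumerate p.2 0).filter
                (fun q => q.2 == "@" && fewerThanFour p.1 q.1 g)).map (fun q => (p.1, q.1)))).length : Int),
         l ++ rows.flatMap (fun p =>
            ((PySem.List.enumerate p.2 0).filter
                (fun q => q.2 == "@" && fewerThanFour p.1 q.1 g)).map (fun q => (p.1, q.1)))) := by
  induction rows generalizing t l with
  | nil => simp
  | cons r rows ih =>
    simp only [List.foldl_cons, List.flatMap_cons]
    rw [foldl_pair_count, ih]
    refine Prod.ext ?_ ?_
    · show _ = t + (_ : Int); push_cast [List.length_append, List.length_map]; ring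
    · simp

lemma ride_eq (g : List (List String)) :
    rideUntilNoMoreChanges g = (((selList g).length : Int), markGrid g (selList g)) := by
  unfold rideUntilNoMoreChanges
  rw [ride_fold g]
  simp [selList, markGrid]
lemma mem_enumerate_fst_ge {α : Type} (xs : List α) (s : Int) (x : Int × α)
    (h : x ∈ PySem.List.enumerate xs s) : s ≤ x.1 ∧ x.1 < s + xs.length := by
  rw [PySem.List.mem_enumerate_iff] at h
  obtain ⟨k, hk, rfl⟩ := h
  simp; omega

lemma cellAt_natCast (g : List (List String)) (k j : Nat) (hk : k < g.length)
    (hj : j < g[k].length) : cellAt g (k : Int) (j : Int) = g[k][j] := by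
  unfold cellAt
  rw [PySem.List.pyGet?_natCast g, List.getElem?_eq_getElem hk, Option.getD_some,
    PySem.List.pyGet?_natCast, List.getElem?_eq_getElem hj, Option.getD_some]

lemma mem_atList_iff (g : List (List String)) (hr : Rect g) (r c : Int) :
    (r, c) ∈ atList g ↔
      0 ≤ r ∧ r < (g.length : Int) ∧ 0 ≤ c ∧ c < ((g.headD []).length : Int) ∧
        cellAt g r c = "@" := by
  unfold atList
  simp only [List.mem_flatMap, List.mem_map, List.mem_filter,
    PySem.List.mem_enumerate_iff]
  constructor
  · rintro ⟨p, ⟨k, hk, rfl⟩, q, ⟨⟨j, hj, rfl⟩, hq⟩, hpq⟩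
    simp only [Prod.mk.injEq] at hpq
    obtain ⟨rfl, rfl⟩ := hpq
    have hW : g[k].length = (g.headD []).length := hr _ (by simp)
    simp only [zero_add] at *
    simp only at hj hq
    refine ⟨by positivity, by exact_mod_cast hk, by positivity, by rw [← hW]; exact_mod_cast hj, ?_⟩
    rw [cellAt_natCast g k j hk hj]
    simpa using hq
  · rintro ⟨h0, h1, h2, h3, hc⟩
    obtain ⟨k, rfl⟩ := Int.eq_ofNat_of_zero_le h0
    obtain ⟨j, rfl⟩ := Int.eq_ofNat_of_zero_le h2
    have hk : k < g.length := by exact_mod_cast h1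
    have hW : g[k].length = (g.headD []).length := hr _ (by simp)
    have hj : j < g[k].length := by rw [hW]; exact_mod_cast h3
    refine ⟨(k, g[k]), ⟨k, hk, by simp⟩, (j, g[k][j]), ⟨⟨j, hj, by simp⟩, ?_⟩, by simp⟩
    rw [cellAt_natCast g k j hk hj] at hc
    simpa using hc

lemma nodup_atList_aux (rows : List (List String)) (s : Int) :
    ((PySem.List.enumerate rows s).flatMap (fun p =>
      ((PySem.List.enumerate p.2 0).filter (fun q => q.2 == "@")).map
        (fun q => (p.1, q.1)))).Nodup := by
  induction rows generalizing s with
  | nil => simp [PySem.List.enumerate_nil]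
  | cons row rows ih =>
    rw [PySem.List.enumerate_cons, List.flatMap_cons]
    refine List.Nodup.append ?_ (ih (s + 1)) ?_
    · -- positions within one row are distinct (distinct column indices)
      have hpw : ((PySem.List.enumerate row 0).filter (fun q => q.2 == "@")).Pairwise
          (fun a b => a.1 < b.1) :=
        List.Pairwise.filter _ (PySem.List.pairwise_lt_enumerate row 0)
      rw [List.nodup_iff_pairwise_ne, List.pairwise_map]
      exact hpw.imp (by intro a b hab; simp; omega)
    · -- row index s differs from all later row indices
      intro x hx hx'
      simp only [List.mem_map, List.mem_filter] at hx
      obtain ⟨q, _, rfl⟩ := hx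
      simp only [List.mem_flatMap, List.mem_map, List.mem_filter] at hx'
      obtain ⟨p, hp, q', _, hq'⟩ := hx'
      have := mem_enumerate_fst_ge _ _ _ hp
      have : s + 1 ≤ p.1 := this.1
      have : (s, q.1) = (p.1, q'.1) := hq'.symm ▸ rfl
      simp at this; omega

lemma nodup_atList (g : List (List String)) : (atList g).Nodup := nodup_atList_aux g 0

lemma aliveInit_eq (g : List (List String)) : aliveInit g = atList g := by
  have h : ∀ (rows : List (Int × List String)) (s : PySem.Set (Int × Int)),
      rows.foldl (fun s p =>
        (PySem.List.enumerate p.2 0).foldl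
          (fun s q => if q.2 == "@" then PySem.Set.add s (p.1, q.1) else s) s) s
      = PySem.Set.update s (rows.flatMap (fun p =>
          ((PySem.List.enumerate p.2 0).filter (fun q => q.2 == "@")).map
            (fun q => (p.1, q.1)))) := by
    intro rows
    induction rows with
    | nil => intro s; simp [PySem.Set.update]
    | cons r rows ih =>
      intro s
      rw [List.foldl_cons, List.flatMap_cons, PySem.Set.update_append, ih]
      congr 1
      rw [PySem.Set.update_map_eq_foldl_add, ← List.foldl_filter]
  unfold aliveInit
  rw [h]
  show PySem.Set.update PySem.Set.empty (atList g) = _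
  rw [PySem.Set.update_empty, PySem.Set.ofList_eq_self_of_nodup (atList g) (nodup_atList g)]
lemma sel_eq_filter (g : List (List String)) :
    selList g = (atList g).filter (fun p => fewerThanFour p.1 p.2 g) := by
  unfold selList atList
  rw [List.filter_flatMap]
  refine List.flatMap_congr ?_
  intro p _
  rw [List.filter_map, List.filter_filter]
  congr 1
  apply List.filter_congr
  intro q _
  simp [Function.comp, Bool.and_comm]

lemma enumerate_map_enum {α β : Type} (xs : List α) (s : Int) (F : Int → α → β) :
    PySem.List.enumerate ((PySem.List.enumerate xs s).map (fun p => F p.1 p.2)) s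
      = (PySem.List.enumerate xs s).map (fun p => (p.1, F p.1 p.2)) := by
  induction xs generalizing s with
  | nil => simp [PySem.List.enumerate_nil]
  | cons x xs ih =>
    rw [PySem.List.enumerate_cons, List.map_cons, PySem.List.enumerate_cons, ih]
    simp

lemma rowpiece_mark (a : Int) (tbr : List (Int × Int)) (l : List (Int × String)) :
    ((l.map (fun q => (q.1, if (a, q.1) ∈ tbr then "x" else q.2))).filter
        (fun q => q.2 == "@")).map (fun q => (a, q.1))
      = ((l.filter (fun q => q.2 == "@")).map (fun q => (a, q.1))).filter
          (fun x => decide (x ∉ tbr)) := by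
  induction l with
  | nil => simp
  | cons q l ih =>
    simp only [List.map_cons, List.filter_cons]
    by_cases h : (a, q.1) ∈ tbr
    · by_cases h2 : q.2 == "@" <;> simp [h, h2, ih]
    · by_cases h2 : q.2 == "@" <;> simp [h, h2, ih]

lemma atList_markGrid (g : List (List String)) (tbr : List (Int × Int)) :
    atList (markGrid g tbr) = (atList g).filter (fun p => decide (p ∉ tbr)) := by
  unfold atList markGrid
  rw [enumerate_map_enum g 0
    (fun a b => (PySem.List.enumerate b 0).map (fun q => if (a, q.1) ∈ tbr then "x" else q.2)),
    List.flatMap_map, List.filter_flatMap]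
  refine List.flatMap_congr ?_
  intro p _
  rw [enumerate_map_enum p.2 0 (fun a b => if (p.1, a) ∈ tbr then "x" else b)]
  exact rowpiece_mark p.1 tbr (PySem.List.enumerate p.2 0)

lemma rect_markGrid (g : List (List String)) (tbr : List (Int × Int)) (hr : Rect g) :
    Rect (markGrid g tbr) := by
  intro row hrow
  have hhead : ((markGrid g tbr).headD []).length = (g.headD []).length := by
    cases g with
    | nil => rfl
    | cons r rs =>
      show (((PySem.List.enumerate (r :: rs) 0).map _).headD []).length = _
      rw [PySem.List.enumerate_cons, List.map_cons, List.headD_cons]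
      simp
  rw [hhead]
  unfold markGrid at hrow
  simp only [List.mem_map, PySem.List.mem_enumerate_iff] at hrow
  obtain ⟨p, ⟨k, hk, rfl⟩, rfl⟩ := hrow
  simp only [List.length_map, PySem.List.length_enumerate]
  exact hr _ (List.getElem_mem hk)

lemma length_atList (g : List (List String)) : (atList g).length = atCount g := by
  unfold atList atCount
  rw [List.length_flatMap]
  have : ∀ (s : Int), ((PySem.List.enumerate g s).map (fun p =>
      (((PySem.List.enumerate p.2 0).filter (fun q => q.2 == "@")).map
        (fun q => (p.1, q.1))).length)).sum
      = (g.map (fun row => row.count "@")).sum := by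
    intro s
    induction g generalizing s with
    | nil => simp [PySem.List.enumerate_nil]
    | cons row rows ih =>
      rw [PySem.List.enumerate_cons, List.map_cons, List.map_cons, List.sum_cons,
        List.sum_cons, ih]
      congr 1
      rw [List.length_map, ← List.countP_eq_length_filter]
      show (PySem.List.enumerate row 0).countP (fun q => q.2 == "@") = _
      conv_rhs => rw [List.count, ← PySem.List.map_snd_enumerate row 0]
      rw [List.countP_map]
      rfl
  exact this 0
-- 0/1 indicator of a live cell
def ind (g : List (List String)) (r c : Int) : Int := if (r, c) ∈ atList g then 1 else 0

lemma ind_eq_zero (g : List (List String)) (hr : Rect g) (r c : Int)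
    (h : r < 0 ∨ (g.length : Int) ≤ r ∨ c < 0 ∨ ((g.headD []).length : Int) ≤ c) :
    ind g r c = 0 := by
  unfold ind
  rw [if_neg]
  intro hm
  rw [mem_atList_iff g hr] at hm
  obtain ⟨h0, h1, h2, h3, -⟩ := hm
  omega

lemma sum_extend (f : Int → Int) {lo lo' hi' hi : Int} (h1 : lo ≤ lo') (h2 : lo' ≤ hi')
    (h3 : hi' ≤ hi) (hlow : ∀ r, lo ≤ r → r < lo' → f r = 0)
    (hhigh : ∀ r, hi' ≤ r → r < hi → f r = 0) :
    ((PySem.List.pyRange lo' hi' 1).map f).sum = ((PySem.List.pyRange lo hi 1).map f).sum := by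
  rw [PySem.List.pyRange_one_append lo lo' hi h1 (h2.trans h3),
    PySem.List.pyRange_one_append lo' hi' hi h2 h3]
  simp only [List.map_append, List.sum_append]
  have hL : ((PySem.List.pyRange lo lo' 1).map f).sum = 0 := by
    apply List.sum_eq_zero
    intro x hx
    simp only [List.mem_map] at hx
    obtain ⟨r, hr, rfl⟩ := hx
    rw [PySem.List.mem_pyRange_one] at hr
    exact hlow r hr.1 hr.2
  have hH : ((PySem.List.pyRange hi' hi 1).map f).sum = 0 := by
    apply List.sum_eq_zero
    intro x hx
    simp only [List.mem_map] at hx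
    obtain ⟨r, hr, rfl⟩ := hx
    rw [PySem.List.mem_pyRange_one] at hr
    exact hhigh r hr.1 hr.2
  rw [hL, hH]
  ring

lemma pyRange3 (a : Int) : PySem.List.pyRange (a - 1) (a + 2) 1 = [a - 1, a, a + 1] := by
  rw [PySem.List.pyRange_one_cons (by omega), show a - 1 + 1 = a from by ring,
    PySem.List.pyRange_one_cons (by omega),
    PySem.List.pyRange_one_cons (by omega), PySem.List.pyRange_one_eq_nil (by omega)]
lemma fewer_unfold (r c : Int) (g : List (List String)) :
    fewerThanFour r c g = decide
      ((PySem.List.pyRange (max 0 (r - 1)) (min (r + 2) (g.length : Int)) 1).foldl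
        (fun acc row =>
          (PySem.List.pyRange (max 0 (c - 1))
              (min (c + 2) (((PySem.List.pyGet? g 0).getD []).length : Int)) 1).foldl
            (fun acc col => if cellAt g row col == "@" then acc + 1 else acc) acc)
        (-1) < 4) := rfl

lemma head_getD (g : List (List String)) : (PySem.List.pyGet? g 0).getD [] = g.headD [] := by
  rw [PySem.List.pyGet?_zero]
  cases g <;> simp

lemma inner_count_eq (g : List (List String)) (hr : Rect g) (row c : Int)
    (hrow : 0 ≤ row ∧ row < (g.length : Int)) (hc : 0 ≤ c ∧ c < ((g.headD []).length : Int)) :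
    ((((PySem.List.pyRange (max 0 (c - 1)) (min (c + 2) ((g.headD []).length : Int)) 1)).countP
        (fun col => cellAt g row col == "@") : Int))
      = ind g row (c - 1) + ind g row c + ind g row (c + 1) := by
  rw [← PySem.List.sum_map_ite_one_zero]
  have hcong : (PySem.List.pyRange (max 0 (c - 1)) (min (c + 2) ((g.headD []).length : Int)) 1).map
      (fun col => if (cellAt g row col == "@") = true then (1 : Int) else 0)
      = (PySem.List.pyRange (max 0 (c - 1)) (min (c + 2) ((g.headD []).length : Int)) 1).map
        (fun col => ind g row col) := by
    apply List.map_congr_left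
    intro col hcol
    rw [PySem.List.mem_pyRange_one] at hcol
    unfold ind
    have hiff : (cellAt g row col = "@") ↔ ((row, col) ∈ atList g) := by
      rw [mem_atList_iff g hr]
      constructor
      · intro h; exact ⟨by omega, by omega, by omega, by omega, h⟩
      · rintro ⟨-, -, -, -, h⟩; exact h
    by_cases hm : (row, col) ∈ atList g
    · rw [if_pos (by simpa using hiff.2 hm), if_pos hm]
    · rw [if_neg (by simpa using fun h => hm (hiff.1 h)), if_neg hm]
  rw [hcong]
  rw [sum_extend (fun col => ind g row col) (lo := c - 1) (hi := c + 2)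
    (by omega) (by omega) (by omega)
    (fun x h1 h2 => ind_eq_zero g hr row x (by omega))
    (fun x h1 h2 => ind_eq_zero g hr row x (by omega))]
  rw [pyRange3, List.map_cons, List.map_cons, List.map_cons, List.map_nil,
    List.sum_cons, List.sum_cons, List.sum_cons, List.sum_nil]
  ring

lemma cond_eq (g : List (List String)) (hr : Rect g) (p : Int × Int) (hp : p ∈ atList g) :
    fewerThanFour p.1 p.2 g = decide (neighborSum (atList g) p - 1 < 4) := by
  obtain ⟨r, c⟩ := p
  obtain ⟨h0, h1, h2, h3, -⟩ := (mem_atList_iff g hr r c).1 hp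
  rw [fewer_unfold, head_getD]
  simp only [PySem.List.foldl_count_if, PySem.List.foldl_add]
  have hS : ((PySem.List.pyRange (max 0 (r - 1)) (min (r + 2) (g.length : Int)) 1).map
      (fun row => ((((PySem.List.pyRange (max 0 (c - 1))
          (min (c + 2) ((g.headD []).length : Int)) 1)).countP
        (fun col => cellAt g row col == "@") : Int)))).sum
      = neighborSum (atList g) (r, c) := by
    have hcong : (PySem.List.pyRange (max 0 (r - 1)) (min (r + 2) (g.length : Int)) 1).map
        (fun row => ((((PySem.List.pyRange (max 0 (c - 1))
            (min (c + 2) ((g.headD []).length : Int)) 1)).countP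
          (fun col => cellAt g row col == "@") : Int)))
        = (PySem.List.pyRange (max 0 (r - 1)) (min (r + 2) (g.length : Int)) 1).map
          (fun row => ind g row (c - 1) + ind g row c + ind g row (c + 1)) := by
      apply List.map_congr_left
      intro row hrowm
      rw [PySem.List.mem_pyRange_one] at hrowm
      exact inner_count_eq g hr row c ⟨by omega, by omega⟩ ⟨h2, h3⟩
    rw [hcong]
    rw [sum_extend (fun row => ind g row (c - 1) + ind g row c + ind g row (c + 1))
      (lo := r - 1) (hi := r + 2) (by omega) (by omega) (by omega)
      (fun x hx1 hx2 => by
        show ind g x (c - 1) + ind g x c + ind g x (c + 1) = 0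
        rw [ind_eq_zero g hr x _ (by omega), ind_eq_zero g hr x _ (by omega),
          ind_eq_zero g hr x _ (by omega)]
        ring)
      (fun x hx1 hx2 => by
        show ind g x (c - 1) + ind g x c + ind g x (c + 1) = 0
        rw [ind_eq_zero g hr x _ (by omega), ind_eq_zero g hr x _ (by omega),
          ind_eq_zero g hr x _ (by omega)]
        ring)]
    rw [pyRange3, List.map_cons, List.map_cons, List.map_cons, List.map_nil,
      List.sum_cons, List.sum_cons, List.sum_cons, List.sum_nil]
    simp only [neighborSum, List.foldl_cons, List.foldl_nil, PySem.Set.contains_eq_listContains]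
    simp only [List.contains_eq_mem]
    unfold ind
    simp only [sub_eq_add_neg, add_zero, decide_eq_true_eq]
    ring
  rw [hS]
  have : (-1 : Int) + neighborSum (atList g) (r, c) = neighborSum (atList g) (r, c) - 1 := by ring
  rw [this]
lemma doomed_eq (g : List (List String)) (hr : Rect g) :
    (atList g).filter (fun p => decide (neighborSum (atList g) p - 1 < 4)) = selList g := by
  rw [sel_eq_filter]
  apply List.filter_congr
  intro p hp
  exact (cond_eq g hr p hp).symm

lemma diff_eq_next (g : List (List String)) :
    PySem.Set.diff (atList g) (selList g) = atList (markGrid g (selList g)) := by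
  rw [atList_markGrid]
  apply List.filter_congr
  intro x hx
  simp

lemma go_eq (fuel : Nat) (t : Int) (g : List (List String)) (hr : Rect g) :
    part2Go fuel t g = part2AltGo fuel t (atList g) := by
  induction fuel generalizing t g with
  | zero => rfl
  | succ n ih =>
    simp only [part2Go, part2AltGo]
    rw [ride_eq g, doomed_eq g hr]
    by_cases hsel : selList g = []
    · rw [hsel]
      simp
    · have hlen : ((selList g).length : Int) ≠ 0 := by
        simpa using fun h => hsel (List.eq_nil_of_length_eq_zero h)
      rw [if_neg (by simpa using hlen), if_neg (by simpa using hsel)]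
      rw [ih (t + ((selList g).length : Int)) (markGrid g (selList g))
        (rect_markGrid g (selList g) hr), diff_eq_next]

lemma atList_eq_nil_of_no_at (data : List (List String))
    (hno : ∀ row ∈ data, "@" ∉ row) : atList data = [] := by
  rw [List.eq_nil_iff_forall_not_mem]
  intro p hp
  unfold atList at hp
  simp only [List.mem_flatMap, List.mem_map, List.mem_filter,
    PySem.List.mem_enumerate_iff] at hp
  obtain ⟨q, ⟨k, hk, rfl⟩, w, ⟨⟨j, hj, rfl⟩, hq⟩, -⟩ := hp
  simp only at hj hq
  have : "@" ∈ data[k] := by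
    have : data[k][j] = "@" := by simpa using hq
    rw [← this]; exact List.getElem_mem hj
  exact hno data[k] (List.getElem_mem hk) this


-- ===== VERDICT (by name: the statement is the Claim_ definition above) =====
theorem part2_spec : Claim_equal_part2 := by
  unfold Claim_equal_part2 Spec_part2
  intro data _ hpre
  unfold part2 part2_alt
  rw [aliveInit_eq]
  cases hpre with
  | inl hrect =>
    rw [length_atList]
    exact go_eq (atCount data + 1) 0 data hrect
  | inr hno =>
    have hat : atList data = [] := atList_eq_nil_of_no_at data hno
    have hcnt : atCount data = 0 := by rw [← length_atList, hat]; rfl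
    rw [hcnt, hat]
    simp only [part2Go, part2AltGo, ride_eq]
    rw [sel_eq_filter, hat]
    simp
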